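-- pv_equiv track=rewrite | github.com/goravjhabakh/bhavcopy | backend/src/bhavcopy.py | label_encode
-- ===== SOURCE A (Python) =====
-- def label_encode(row):
--     d = {}
--     x=0
--     for element in row:
--         if element not in d.keys():
--             d[element] = x
--             x+=1
--     return d
-- ===== SOURCE B (Python) =====
-- def label_encode(row):
--     firsts = {el: row.index(el) for el in row}
--     order = sorted(firsts, key=firsts.get)
--     return {el: rank for rank, el in enumerate(order)}
-- ===== Notes on version B (the rewrite author's own statement) =====
-- stated objective: alternative
-- what changed: B computes each element's first-occurrence position by scanning with row.index, sorts the distinct elements by that position and assigns labels by rank, instead of A's single pass that grows a dict with an inline counter and membership guard.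
import Mathlib
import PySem

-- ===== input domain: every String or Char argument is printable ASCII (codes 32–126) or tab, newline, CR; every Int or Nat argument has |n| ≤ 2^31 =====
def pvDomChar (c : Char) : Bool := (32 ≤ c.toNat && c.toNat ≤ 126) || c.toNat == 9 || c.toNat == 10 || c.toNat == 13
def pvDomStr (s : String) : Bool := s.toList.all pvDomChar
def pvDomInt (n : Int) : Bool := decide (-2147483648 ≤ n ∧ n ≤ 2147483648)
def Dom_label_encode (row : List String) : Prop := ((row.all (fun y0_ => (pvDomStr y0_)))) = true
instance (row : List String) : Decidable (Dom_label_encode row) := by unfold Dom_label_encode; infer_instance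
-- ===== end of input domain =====

-- B finds each element's first-occurrence position by scanning (row.index), sorts the distinct
-- elements by that position and ranks them, instead of A's single pass with a counter and
-- membership guard. Objective: alternative (B trades A's O(n) single pass for index+sort).

-- ===== PORT A =====
def label_encode (row : List String) : List (String × Int) :=
  let st := row.foldl
    (fun (s : PySem.Dict String Int × Int) element =>
      if (PySem.Dict.contains s.1 element) = false then
        (PySem.Dict.insert s.1 element s.2, s.2 + 1)
      else s)
    (PySem.Dict.empty, 0)
  st.1.items

-- ===== PORT B =====
def label_encode_alt (row : List String) : List (String × Int) :=
  -- row.index(el): el ∈ row always, so index?.getD 0 is exact here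
  let firsts : PySem.Dict String Int :=
    row.foldl (fun d el => d.insert el (((PySem.List.index? row el).getD 0 : Nat) : Int)) PySem.Dict.empty
  -- firsts.get(el) as sort key: el ranges over firsts' keys, so getD _ 0 is exact here
  let order := PySem.List.sorted firsts.keys (fun el => firsts.getD el 0) false
  (PySem.List.enumerate order 0).map (fun p => (p.2, p.1))

-- ===== PRECONDITION & SPEC =====
def Spec_label_encode (row : List String) (out : List (String × Int)) : Prop := out = label_encode_alt row
instance (row : List String) (out : List (String × Int)) : Decidable (Spec_label_encode row out) := by unfold Spec_label_encode; infer_instance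

-- ===== CLAIM (what is proved, stated in full; the proofs are below) =====
def Claim_equal_label_encode : Prop := ∀ (row : List String), Dom_label_encode row → Spec_label_encode row (label_encode row)

-- ===== LEMMAS AND PROOFS =====

-- A's loop: the dict's items are the first occurrences enumerated in order.
theorem label_encode_loop_inv (l : List String) (d : PySem.Dict String Int) (x : Int)
    (hnd : d.keys.Nodup)
    (hitems : d.items = (PySem.List.enumerate d.keys 0).map (fun p => (p.2, p.1)))
    (hx : x = (d.keys.length : Int)) :
    (l.foldl
      (fun (s : PySem.Dict String Int × Int) element =>
        if (PySem.Dict.contains s.1 element) = false then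
          (PySem.Dict.insert s.1 element s.2, s.2 + 1)
        else s)
      (d, x)).1.items
    = (PySem.List.enumerate (PySem.Set.update d.keys l) 0).map (fun p => (p.2, p.1)) := by
  induction l generalizing d x with
  | nil => simpa [PySem.Set.update_nil] using hitems
  | cons e l ih =>
    by_cases hc : PySem.Dict.contains d e = true
    · have he : e ∈ d.keys := (PySem.Dict.contains_iff_mem_keys d e).1 hc
      simp only [List.foldl_cons, hc, Bool.true_eq_false, if_false]
      rw [PySem.Set.update_cons, PySem.Set.add_of_mem he]
      exact ih d x hnd hitems hx
    · have hc' : PySem.Dict.contains d e = false := by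
        cases h : PySem.Dict.contains d e
        · rfl
        · exact absurd h hc
      have hne : e ∉ d.keys := fun hmem => hc ((PySem.Dict.contains_iff_mem_keys d e).2 hmem)
      simp only [List.foldl_cons, hc']
      have hkeys : (d.insert e x).keys = d.keys ++ [e] :=
        PySem.Dict.keys_insert_of_not_contains d x hc'
      have hitems' : (d.insert e x).items = d.items ++ [(e, x)] :=
        PySem.Dict.items_insert_of_not_contains d x hc'
      rw [PySem.Set.update_cons, PySem.Set.add_of_not_mem hne]
      have hnd' : (d.keys ++ [e]).Nodup := by
        simp [List.nodup_append, hnd]; exact fun a ha he' => hne (he' ▸ ha)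
      have hit2 : (d.insert e x).items
          = (PySem.List.enumerate (d.insert e x).keys 0).map (fun p => (p.2, p.1)) := by
        rw [hitems', hkeys, PySem.List.enumerate_append, List.map_append, hitems]
        simp [PySem.List.enumerate_cons, PySem.List.enumerate_nil, hx]
      have hx' : x + 1 = (((d.insert e x).keys).length : Int) := by
        rw [hkeys]; simp [hx]
      have := ih (d.insert e x) (x + 1) (by rw [hkeys]; exact hnd') hit2 hx'
      simpa [hkeys] using this

-- A's result in closed form.
theorem label_encode_eq_enum (row : List String) :
    label_encode row
      = (PySem.List.enumerate (PySem.Set.ofList row) 0).map (fun p => (p.2, p.1)) := by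
  unfold label_encode
  have := label_encode_loop_inv row PySem.Dict.empty 0
    (by simp [PySem.Dict.keys_empty]) (by simp [PySem.Dict.keys_empty]; rfl)
    (by simp [PySem.Dict.keys_empty])
  simpa [PySem.Dict.keys_empty, PySem.Set.update_nil_left] using this

-- getD through B's building fold: untouched keys keep their value …
theorem getD_fold_not_mem (f : String → Int) (l : List String) (d : PySem.Dict String Int)
    (el : String) (h : el ∉ l) :
    (l.foldl (fun d x => d.insert x (f x)) d).getD el 0 = d.getD el 0 := by
  induction l generalizing d with
  | nil => rfl
  | cons x l ih =>
    simp only [List.foldl_cons]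
    rw [ih _ (fun hm => h (List.mem_cons_of_mem _ hm)),
      PySem.Dict.getD_insert]
    have hne : el ≠ x := fun he => h (List.mem_cons.2 (Or.inl he))
    rw [if_neg hne]

-- … and every inserted key holds the (dict-independent) value f el.
theorem getD_fold_mem (f : String → Int) (l : List String) (d : PySem.Dict String Int)
    (el : String) (h : el ∈ l) :
    (l.foldl (fun d x => d.insert x (f x)) d).getD el 0 = f el := by
  induction l generalizing d with
  | nil => cases h
  | cons x l ih =>
    simp only [List.foldl_cons]
    by_cases hm : el ∈ l
    · exact ih _ hm
    · have hx : el = x := (List.mem_cons.1 h).resolve_right hm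
      rw [getD_fold_not_mem f l _ el hm, PySem.Dict.getD_insert, if_pos hx, hx]

-- first-occurrence position of a member is below the length
theorem idx_lt_length (row : List String) (a : String) (h : a ∈ row) :
    (PySem.List.index? row a).getD 0 < row.length := by
  have hs : (PySem.List.index? row a).isSome := (PySem.List.index?_isSome_iff row a).2 h
  obtain ⟨k, hk⟩ := Option.isSome_iff_exists.1 hs
  obtain ⟨hlt, -, -⟩ := PySem.List.getElem_of_index?_eq_some hk
  rw [hk, Option.getD_some]
  exact hlt

-- the distinct-elements list is strictly increasing under first-occurrence position
theorem pairwise_idx (row : List String) :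
    (PySem.Set.ofList row).Pairwise
      (fun a b => ((PySem.List.index? row a).getD 0 : Nat) < (PySem.List.index? row b).getD 0) := by
  induction row using List.reverseRecOn with
  | nil => simp [PySem.Set.ofList]
  | append_singleton row y ih =>
    have hset : PySem.Set.ofList (row ++ [y]) = PySem.Set.add (PySem.Set.ofList row) y := by
      simp [PySem.Set.ofList_eq_foldl, List.foldl_append]
    rw [hset]
    have hmemidx : ∀ a ∈ PySem.Set.ofList row,
        PySem.List.index? (row ++ [y]) a = PySem.List.index? row a := fun a ha =>
      PySem.List.index?_append_of_mem [y] ((PySem.Set.mem_ofList row a).1 ha)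
    by_cases hy : y ∈ PySem.Set.ofList row
    · rw [PySem.Set.add_of_mem hy]
      exact ih.imp_of_mem (fun {a b} ha hb hab => by
        rw [hmemidx a ha, hmemidx b hb]; exact hab)
    · rw [PySem.Set.add_of_not_mem hy]
      rw [List.pairwise_append]
      refine ⟨ih.imp_of_mem (fun {a b} ha hb hab => by
          rw [hmemidx a ha, hmemidx b hb]; exact hab),
        List.pairwise_singleton _ _, ?_⟩
      intro a ha b hb
      rw [List.mem_singleton] at hb
      rw [hb]
      have hymem : y ∉ row := fun hm => hy ((PySem.Set.mem_ofList row y).2 hm)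
      rw [hmemidx a ha, PySem.List.index?_append_singleton_self row y hymem]
      rw [Option.getD_some]
      exact idx_lt_length row a ((PySem.Set.mem_ofList row a).1 ha)

-- B's sort is the identity on the distinct-elements list.
theorem label_encode_alt_eq_enum (row : List String) :
    label_encode_alt row
      = (PySem.List.enumerate (PySem.Set.ofList row) 0).map (fun p => (p.2, p.1)) := by
  have hdef : label_encode_alt row
      = (PySem.List.enumerate (PySem.List.sorted
          (row.foldl (fun d el => d.insert el (((PySem.List.index? row el).getD 0 : Nat) : Int))
            PySem.Dict.empty).keys
          (fun el => (row.foldl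
            (fun d el => d.insert el (((PySem.List.index? row el).getD 0 : Nat) : Int))
            PySem.Dict.empty).getD el 0) false) 0).map (fun p => (p.2, p.1)) := rfl
  rw [hdef]
  have hkeys : (row.foldl
      (fun d el => d.insert el (((PySem.List.index? row el).getD 0 : Nat) : Int))
      PySem.Dict.empty).keys = PySem.Set.ofList row := by
    rw [PySem.Dict.keys_foldl_insert]
    simp [PySem.Dict.keys_empty, PySem.Set.update_nil_left]
  rw [hkeys]
  have hsorted : PySem.List.sorted (PySem.Set.ofList row)
      (fun el => (row.foldl
        (fun d el => d.insert el (((PySem.List.index? row el).getD 0 : Nat) : Int))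
        PySem.Dict.empty).getD el 0) false = PySem.Set.ofList row := by
    apply PySem.List.sorted_eq_of_perm_of_pairwise_lt _ _ _ (List.Perm.refl _)
    exact (pairwise_idx row).imp_of_mem (fun {a b} ha hb hab => by
      rw [getD_fold_mem _ row _ a ((PySem.Set.mem_ofList row a).1 ha),
        getD_fold_mem _ row _ b ((PySem.Set.mem_ofList row b).1 hb)]
      exact_mod_cast hab)
  rw [hsorted]

-- ===== VERDICT (by name: the statement is the Claim_ definition above) =====
theorem label_encode_spec : Claim_equal_label_encode := by
  intro row _
  unfold Spec_label_encode
  rw [label_encode_eq_enum, label_encode_alt_eq_enum]
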